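-- pv_equiv track=rewrite | github.com/cr496352127/comp9021-solutions | final/21t3_22t3_final_q1-8/3.py | longest_leftmost_sequence_of_consecutive_letters
-- ===== SOURCE A (Python) =====
-- def longest_leftmost_sequence_of_consecutive_letters(word):
--     '''
--     Find and return the LONGEST LEFTMOST sequence of consecutive letters.
--     You can assume that "word" is a string of nothing but lowercase letters.
--
--     >>> longest_leftmost_sequence_of_consecutive_letters('')
--     ''
--     >>> longest_leftmost_sequence_of_consecutive_letters('a')
--     'a'
--     >>> longest_leftmost_sequence_of_consecutive_letters('zuba')
--     'z'
--     >>> longest_leftmost_sequence_of_consecutive_letters('ab')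
--     'ab'
--     >>> longest_leftmost_sequence_of_consecutive_letters('bcab')
--     'bc'
--     >>> longest_leftmost_sequence_of_consecutive_letters('aefbxyzcrsdt')
--     'xyz'
--     >>> longest_leftmost_sequence_of_consecutive_letters('efghuvwrstuvabcde')
--     'rstuv'
--     '''
--     # INSERT YOUR CODE HERE
--     # If the given word is empty, then return it directly
--     if not word:
--         return ""
--
--     n = len(word)
--
--     # Store current_str that has leftmost sequence of consecutive letters
--     # Initially, the character at index 0 must in current_str
--     current_str = word[0]
--
--     # Store the result. It can be initialized by current_str above
--     res = current_str
--
--     # Traverse another characters from index 1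
--     for i in range(1, n):
--         # Store ord value of prev character (prev_ord) and current character (current_ord) respectively
--         prev_ord, current_ord = ord(word[i - 1]), ord(word[i])
--
--         # If current_ord is greater than prev_ord by 1, then we can add character word[i] to current_str
--         if current_ord == prev_ord + 1:
--             current_str += word[i]
--
--         # Otherwise, we get a break index
--         else:
--             # If length of current_str is greater than that of res, then we set res = current_str
--             if len(current_str) > len(res):
--                 res = current_str
--
--             # Regardless of the above if statement is true, we should set current_word = word[i], to find new current_str
--             current_str = word[i]
--
--     # Finally, we should check again, because current_str after traversing may have longer length than that of res
--     if len(current_str) > len(res):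
--         res = current_str
--     return res
-- ===== SOURCE B (Python) =====
-- def longest_leftmost_sequence_of_consecutive_letters(word):
--     # Dynamic-programming reformulation: tabulate chain[i] = length of the
--     # consecutive-ordinal chain ending at i, then take the first position of the
--     # maximum chain length and slice the run back out of the word.
--     if not word:
--         return ""
--     n = len(word)
--     chain = [1] * n
--     for i in range(1, n):
--         if ord(word[i]) == ord(word[i - 1]) + 1:
--             chain[i] = chain[i - 1] + 1
--     best = max(chain)
--     end = chain.index(best)
--     return word[end - best + 1:end + 1]
-- ===== Notes on version B (the rewrite author's own statement) =====
-- stated objective: alternative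
-- what changed: Replaces A's scan that accumulates run substrings with an interleaved running maximum by a DP table: chain[i] = length of the consecutive chain ending at i, then the answer is sliced out of the word at the first position of the maximal chain value.
import Mathlib
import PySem

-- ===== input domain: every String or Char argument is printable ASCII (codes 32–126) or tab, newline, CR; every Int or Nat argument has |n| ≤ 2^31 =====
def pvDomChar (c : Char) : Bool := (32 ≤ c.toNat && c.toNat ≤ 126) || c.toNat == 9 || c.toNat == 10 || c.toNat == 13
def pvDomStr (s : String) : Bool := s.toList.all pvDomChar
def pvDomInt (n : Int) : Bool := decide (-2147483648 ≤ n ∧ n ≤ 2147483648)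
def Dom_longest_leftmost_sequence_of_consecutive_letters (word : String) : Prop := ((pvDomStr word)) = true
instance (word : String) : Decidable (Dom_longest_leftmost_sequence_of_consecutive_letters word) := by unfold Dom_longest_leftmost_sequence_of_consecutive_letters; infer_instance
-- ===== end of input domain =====

-- B replaces A's run-string scan with a running maximum by a DP table of chain lengths
-- (chain[i] = length of the consecutive chain ending at i), then argmax + slice.

-- ===== PORT A =====
-- A's loop over i in range(1, n): state (prev char, current_str, res), rest of the word.
def pvGoA (prev : Char) (cur res : List Char) : List Char → List Char
  | [] => if cur.length > res.length then cur else res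
  | c :: t =>
    if c.toNat = prev.toNat + 1 then
      pvGoA c (cur ++ [c]) res t
    else
      pvGoA c [c] (if cur.length > res.length then cur else res) t

def longest_leftmost_sequence_of_consecutive_letters (word : String) : String :=
  match word.toList with
  | [] => ""
  | c :: t => String.ofList (pvGoA c [c] [c] t)

-- ===== PORT B =====
-- Source B's DP loop "chain[i] = chain[i-1] + 1 if consecutive else 1", built in order
-- (pc is chain[i-1], prev is word[i-1]).
def pvChain (prev : Char) (pc : Nat) : List Char → List Nat
  | [] => []
  | c :: t =>
    if c.toNat = prev.toNat + 1 then (pc + 1) :: pvChain c (pc + 1) t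
    else 1 :: pvChain c 1 t

def longest_leftmost_sequence_of_consecutive_letters_alt (word : String) : String :=
  match word.toList with
  | [] => ""
  | c :: t =>
    let chain := 1 :: pvChain c 1 t
    match PySem.List.max? chain (fun x => x) with
    | none => ""   -- unreachable: chain is nonempty (totality guard only)
    | some best =>
      match PySem.List.index? chain best with
      | none => ""   -- unreachable: best ∈ chain (totality guard only)
      | some e =>
        String.ofList (PySem.List.slice (c :: t) (some ((e : Int) - (best : Int) + 1)) (some ((e : Int) + 1)))

-- ===== PRECONDITION & SPEC =====
def Spec_longest_leftmost_sequence_of_consecutive_letters (word : String) (out : String) : Prop := out = longest_leftmost_sequence_of_consecutive_letters_alt word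
instance (word : String) (out : String) : Decidable (Spec_longest_leftmost_sequence_of_consecutive_letters word out) := by unfold Spec_longest_leftmost_sequence_of_consecutive_letters; infer_instance

-- ===== CLAIM (what is proved, stated in full; the proofs are below) =====
def Claim_equal_longest_leftmost_sequence_of_consecutive_letters : Prop := ∀ (word : String), Dom_longest_leftmost_sequence_of_consecutive_letters word → Spec_longest_leftmost_sequence_of_consecutive_letters word (longest_leftmost_sequence_of_consecutive_letters word)

-- ===== LEMMAS AND PROOFS =====

-- the running-max step of A's loop (keeps the earlier run on ties)
def pvStep (b x : List Char) : List Char := if b.length < x.length then x else b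

-- A's run list, made explicit for the proof
def pvRunsB (prev : Char) (cur : List Char) (acc : List (List Char)) : List Char → List (List Char)
  | [] => acc ++ [cur]
  | c :: t =>
    if c.toNat = prev.toNat + 1 then
      pvRunsB c (cur ++ [c]) acc t
    else
      pvRunsB c [c] (acc ++ [cur]) t

def pvRunsOf : List Char → List (List Char)
  | [] => []
  | c :: t => pvRunsB c [c] [] t

-- leftmost-longest selection, head preferred on ties
def pvChoose : List (List Char) → List Char
  | [] => []
  | r :: t => if (pvChoose t).length ≤ r.length then r else pvChoose t

-- split off the leading maximal consecutive run (proof bookkeeping)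
def pvSplit (prev : Char) : List Char → List Char × List Char
  | [] => ([], [])
  | c :: t =>
    if c.toNat = prev.toNat + 1 then
      let p := pvSplit c t
      (c :: p.1, p.2)
    else ([], c :: t)

-- the chain values of a whole word
def pvChainOf : List Char → List Nat
  | [] => []
  | c :: t => 1 :: pvChain c 1 t

-- [1, 2, …, k]
def pvRamp (k : Nat) : List Nat := (List.range k).map (· + 1)

lemma pvSplit_snd_le (prev : Char) (l : List Char) : (pvSplit prev l).2.length ≤ l.length := by
  induction l generalizing prev with
  | nil => simp [pvSplit]
  | cons c t ih =>
    simp only [pvSplit]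
    by_cases h : c.toNat = prev.toNat + 1
    · rw [if_pos h]; exact le_trans (ih c) (by simp)
    · rw [if_neg h]

lemma pvRunsB_acc (rest : List Char) : ∀ (prev : Char) (cur : List Char) (acc : List (List Char)),
    pvRunsB prev cur acc rest = acc ++ pvRunsB prev cur [] rest := by
  induction rest with
  | nil => intro prev cur acc; simp [pvRunsB]
  | cons c t ih =>
    intro prev cur acc
    simp only [pvRunsB]
    by_cases h : c.toNat = prev.toNat + 1
    · rw [if_pos h, if_pos h]; exact ih c (cur ++ [c]) acc
    · rw [if_neg h, if_neg h, ih c [c] (acc ++ [cur]), ih c [c] ([] ++ [cur])]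
      simp

lemma pvGoA_eq_foldl (rest : List Char) : ∀ (prev : Char) (cur res : List Char),
    pvGoA prev cur res rest = (pvRunsB prev cur [] rest).foldl pvStep res := by
  induction rest with
  | nil => intro prev cur res; simp [pvGoA, pvRunsB, pvStep, List.foldl]
  | cons c t ih =>
    intro prev cur res
    simp only [pvGoA, pvRunsB]
    by_cases h : c.toNat = prev.toNat + 1
    · rw [if_pos h, if_pos h]; exact ih c (cur ++ [c]) res
    · rw [if_neg h, if_neg h, ih c [c] _, pvRunsB_acc t c [c] ([] ++ [cur])]
      simp [pvStep]

lemma foldl_pvStep_eq_pvChoose (rs : List (List Char)) : ∀ (r : List Char),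
    rs.foldl pvStep r = pvChoose (r :: rs) := by
  induction rs with
  | nil => intro r; simp [pvChoose, List.foldl]
  | cons x t ih =>
    intro r
    have h1 : (x :: t).foldl pvStep r = pvChoose (pvStep r x :: t) := by
      simpa [List.foldl] using ih (pvStep r x)
    rw [h1]
    simp only [pvChoose, pvStep]
    split_ifs <;> first | rfl | omega

lemma pvRunsB_split (t : List Char) : ∀ (prev : Char) (cur : List Char),
    pvRunsB prev cur [] t = (cur ++ (pvSplit prev t).1) :: pvRunsOf (pvSplit prev t).2 := by
  induction t with
  | nil => intro prev cur; simp [pvRunsB, pvSplit, pvRunsOf]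
  | cons c t ih =>
    intro prev cur
    simp only [pvRunsB, pvSplit]
    by_cases h : c.toNat = prev.toNat + 1
    · rw [if_pos h, if_pos h, ih c (cur ++ [c])]
      simp
    · rw [if_neg h, if_neg h, pvRunsB_acc t c [c] ([] ++ [cur])]
      simp [pvRunsOf]

lemma pvStep_head (c : Char) (e : List Char) : pvStep [c] (c :: e) = c :: e := by
  cases e with
  | nil => simp [pvStep]
  | cons x t => simp [pvStep]

lemma pvRamp_snoc (k : Nat) : pvRamp (k + 1) = pvRamp k ++ [k + 1] := by
  simp [pvRamp, List.range_succ]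

lemma pvRamp_cons (k : Nat) : pvRamp (k + 1) = 1 :: (pvRamp k).map (· + 1) := by
  simp [pvRamp, List.range_succ_eq_map, List.map_map]

lemma pvRamp_length (k : Nat) : (pvRamp k).length = k := by simp [pvRamp]

lemma mem_pvRamp (x k : Nat) : x ∈ pvRamp k ↔ 1 ≤ x ∧ x ≤ k := by
  simp only [pvRamp, List.mem_map, List.mem_range]
  constructor
  · rintro ⟨i, hi, rfl⟩; omega
  · rintro ⟨h1, h2⟩; exact ⟨x - 1, by omega, by omega⟩

lemma pvChain_split (t : List Char) : ∀ (prev : Char) (pc : Nat),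
    pvChain prev pc t = (pvRamp (pvSplit prev t).1.length).map (· + pc) ++ pvChainOf (pvSplit prev t).2 := by
  induction t with
  | nil => intro prev pc; simp [pvChain, pvSplit, pvChainOf, pvRamp]
  | cons c t ih =>
    intro prev pc
    simp only [pvChain, pvSplit]
    by_cases h : c.toNat = prev.toNat + 1
    · rw [if_pos h, if_pos h, ih c (pc + 1)]
      simp only [List.length_cons, pvRamp_cons, List.map_cons, List.map_map, Function.comp_def]
      rw [show (fun x => x + (pc + 1)) = (fun x => x + 1 + pc) from by funext x; omega]
      simp [Nat.add_comm]
    · rw [if_neg h, if_neg h]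
      simp [pvChainOf, pvRamp]

lemma pvRunsOf_nonempty_runs (l : List Char) : ∀ r ∈ pvRunsOf l, r ≠ [] := by
  induction hn : l.length using Nat.strong_induction_on generalizing l with
  | _ n ih =>
    cases l with
    | nil => simp [pvRunsOf]
    | cons c t =>
      simp only [pvRunsOf, pvRunsB_split t c [c]]
      intro r hr
      rcases List.mem_cons.mp hr with h | h
      · subst h; simp
      · exact ih (pvSplit c t).2.length
          (by have := pvSplit_snd_le c t; simp only [List.length_cons] at hn; omega)
          _ rfl r h

lemma pvChainOf_eq_flatMap (l : List Char) :
    pvChainOf l = (pvRunsOf l).flatMap (fun r => pvRamp r.length) := by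
  induction hn : l.length using Nat.strong_induction_on generalizing l with
  | _ n ih =>
    cases l with
    | nil => simp [pvChainOf, pvRunsOf]
    | cons c t =>
      have hrec : pvChainOf (pvSplit c t).2 = (pvRunsOf (pvSplit c t).2).flatMap (fun r => pvRamp r.length) :=
        ih (pvSplit c t).2.length
          (by have := pvSplit_snd_le c t; simp only [List.length_cons] at hn; omega)
          _ rfl
      have hruns : pvRunsOf (c :: t) = ([c] ++ (pvSplit c t).1) :: pvRunsOf (pvSplit c t).2 := by
        simp only [pvRunsOf]; exact pvRunsB_split t c [c]
      have hchain1 : pvChainOf (c :: t) = 1 :: pvChain c 1 t := by simp only [pvChainOf]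
      rw [hchain1, pvChain_split t c 1, hruns, List.flatMap_cons, ← hrec]
      rw [List.singleton_append, List.length_cons, pvRamp_cons]
      simp

lemma pvRunsB_flatten (t : List Char) : ∀ (prev : Char) (cur : List Char),
    (pvRunsB prev cur [] t).flatten = cur ++ t := by
  induction t with
  | nil => intro prev cur; simp [pvRunsB]
  | cons c t ih =>
    intro prev cur
    simp only [pvRunsB]
    by_cases h : c.toNat = prev.toNat + 1
    · rw [if_pos h, ih c (cur ++ [c])]; simp
    · rw [if_neg h, pvRunsB_acc t c [c] ([] ++ [cur])]
      simp [ih c [c]]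

lemma foldl_max_init (xs : List Nat) : ∀ (a : Nat), xs.foldl max a = max a (xs.foldl max 0) := by
  induction xs with
  | nil => intro a; simp
  | cons x t ih =>
    intro a
    simp only [List.foldl]
    rw [ih (max a x), ih (max 0 x)]
    omega

lemma foldl_max_pvRamp (k : Nat) : ∀ (a : Nat), (pvRamp k).foldl max a = max a k := by
  induction k with
  | zero => intro a; simp [pvRamp]
  | succ k ih =>
    intro a
    rw [pvRamp_snoc, List.foldl_append, ih a]
    simp only [List.foldl]
    omega

lemma foldl_max_flatMap (rs : List (List Char)) : ∀ (a : Nat),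
    (rs.flatMap (fun r => pvRamp r.length)).foldl max a = (rs.map List.length).foldl max a := by
  induction rs with
  | nil => intro a; simp
  | cons r t ih =>
    intro a
    simp only [List.flatMap_cons, List.map_cons, List.foldl_append, List.foldl]
    rw [foldl_max_pvRamp, ih]

lemma pvChoose_length (rs : List (List Char)) :
    (pvChoose rs).length = (rs.map List.length).foldl max 0 := by
  induction rs with
  | nil => simp [pvChoose]
  | cons r t ih =>
    simp only [pvChoose, List.map_cons, List.foldl]
    rw [foldl_max_init]
    split_ifs <;> omega

lemma index?_pvRamp_self (k : Nat) (hk : 1 ≤ k) :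
    PySem.List.index? (pvRamp k) k = some (k - 1) := by
  obtain ⟨m, rfl⟩ : ∃ m, k = m + 1 := ⟨k - 1, by omega⟩
  have hnm : (m + 1) ∉ pvRamp m := by
    intro hmem
    have := (mem_pvRamp (m + 1) m).mp hmem
    omega
  rw [pvRamp_snoc, PySem.List.index?_append_singleton_self (pvRamp m) (m + 1) hnm]
  simp [pvRamp_length]

lemma index?_append_of_not_mem (l : List Nat) : ∀ (t : List Nat) (v : Nat), v ∉ l →
    PySem.List.index? (l ++ t) v = (PySem.List.index? t v).map (· + l.length) := by
  induction l with
  | nil => intro t v _; cases h : List.idxOf? v t <;> simp [h]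
  | cons x l ih =>
    intro t v hv
    have hx : x ≠ v := by intro h; exact hv (by simp [h])
    rw [List.cons_append, PySem.List.index?_cons_of_ne (l ++ t) hx,
      ih t v (by intro h; exact hv (by simp [h]))]
    cases h : List.idxOf? v t <;> simp [h] <;> omega

-- the heart of the B side: the first position of the maximal chain value recovers
-- exactly the leftmost longest run (pvChoose)
lemma pvFirstMax (rs : List (List Char)) (h : ∀ r ∈ rs, r ≠ []) (hne : rs ≠ []) :
    ∃ e, PySem.List.index? (rs.flatMap (fun r => pvRamp r.length)) ((rs.map List.length).foldl max 0) = some e ∧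
      (rs.map List.length).foldl max 0 ≤ e + 1 ∧
      ((rs.flatten).drop (e + 1 - (rs.map List.length).foldl max 0)).take ((rs.map List.length).foldl max 0) = pvChoose rs := by
  induction rs with
  | nil => exact absurd rfl hne
  | cons r t ih =>
    have hK : 1 ≤ r.length := by
      have := h r (by simp)
      cases r with
      | nil => exact absurd rfl this
      | cons _ _ => simp
    have hM : ((r :: t).map List.length).foldl max 0 = max r.length ((t.map List.length).foldl max 0) := by
      simp only [List.map_cons, List.foldl]
      rw [foldl_max_init]
      omega
    by_cases hcmp : (t.map List.length).foldl max 0 ≤ r.length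
    · -- the head run is (one of) the longest: the maximum is first reached inside it
      refine ⟨r.length - 1, ?_, by omega, ?_⟩
      · rw [hM, Nat.max_eq_left hcmp, List.flatMap_cons,
          PySem.List.index?_append_of_mem _ ((mem_pvRamp r.length r.length).mpr ⟨hK, le_refl _⟩),
          index?_pvRamp_self r.length hK]
      · rw [hM, Nat.max_eq_left hcmp]
        have h0 : r.length - 1 + 1 - r.length = 0 := by omega
        rw [h0, List.flatten_cons, List.drop_zero, List.take_left]
        simp only [pvChoose]
        rw [if_pos (by rw [pvChoose_length]; exact hcmp)]
    · -- the maximum lives in the tail: skip the head block entirely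
      have hne' : t ≠ [] := fun hnil => hcmp (by rw [hnil]; simp)
      obtain ⟨e', hidx', hle', hsl'⟩ := ih (fun r hr => h r (by simp [hr])) hne'
      have hMt : ((r :: t).map List.length).foldl max 0 = (t.map List.length).foldl max 0 := by
        rw [hM]; omega
      refine ⟨e' + r.length, ?_, by omega, ?_⟩
      · rw [hMt, List.flatMap_cons, index?_append_of_not_mem _ _ _ (by
          intro hmem
          have := (mem_pvRamp _ r.length).mp hmem
          omega), hidx']
        simp [pvRamp_length]
      · rw [hMt]
        have hsplit : e' + r.length + 1 - (t.map List.length).foldl max 0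
            = r.length + (e' + 1 - (t.map List.length).foldl max 0) := by omega
        rw [List.flatten_cons, hsplit, ← List.drop_drop, List.drop_left]
        simp only [pvChoose]
        rw [if_neg (by rw [pvChoose_length]; omega)]
        exact hsl'

-- ===== VERDICT (by name: the statement is the Claim_ definition above) =====
theorem longest_leftmost_sequence_of_consecutive_letters_spec : Claim_equal_longest_leftmost_sequence_of_consecutive_letters := by
  intro word _
  unfold Spec_longest_leftmost_sequence_of_consecutive_letters
  unfold longest_leftmost_sequence_of_consecutive_letters
  unfold longest_leftmost_sequence_of_consecutive_letters_alt
  cases hw : word.toList with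
  | nil => rfl
  | cons c t =>
    show String.ofList (pvGoA c [c] [c] t) =
      (match PySem.List.max? (1 :: pvChain c 1 t) (fun x => x) with
       | none => ""
       | some best =>
         match PySem.List.index? (1 :: pvChain c 1 t) best with
         | none => ""
         | some e =>
           String.ofList (PySem.List.slice (c :: t) (some ((e : Int) - (best : Int) + 1)) (some ((e : Int) + 1))))
    -- A's side: leftmost longest run of the run list
    have hruns : pvRunsOf (c :: t) = ([c] ++ (pvSplit c t).1) :: pvRunsOf (pvSplit c t).2 := by
      simp only [pvRunsOf]; exact pvRunsB_split t c [c]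
    have hA : pvGoA c [c] [c] t = pvChoose (pvRunsOf (c :: t)) := by
      rw [pvGoA_eq_foldl, pvRunsB_split t c [c], hruns, List.foldl_cons,
        show pvStep [c] ([c] ++ (pvSplit c t).1) = [c] ++ (pvSplit c t).1 from by
          rw [List.singleton_append]; exact pvStep_head c _]
      exact foldl_pvStep_eq_pvChoose _ _
    -- B's side: the chain list is the concatenation of ramps over the same run list
    have hchain : (1 :: pvChain c 1 t) = (pvRunsOf (c :: t)).flatMap (fun r => pvRamp r.length) := by
      have := pvChainOf_eq_flatMap (c :: t)
      simpa [pvChainOf] using this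
    have hnr : ∀ r ∈ pvRunsOf (c :: t), r ≠ [] := pvRunsOf_nonempty_runs (c :: t)
    have hner : pvRunsOf (c :: t) ≠ [] := by rw [hruns]; simp
    obtain ⟨e, hidx, hle, hsl⟩ := pvFirstMax (pvRunsOf (c :: t)) hnr hner
    set M : Nat := ((pvRunsOf (c :: t)).map List.length).foldl max 0 with hMdef
    have hmax : PySem.List.max? (1 :: pvChain c 1 t) (fun x => x) = some M := by
      rw [PySem.List.max?_id_cons]
      congr 1
      have h1 : (pvChain c 1 t).foldl max 1 = (1 :: pvChain c 1 t).foldl max 0 := by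
        simp [List.foldl]
      rw [h1, hchain, foldl_max_flatMap]
    have hidx' : PySem.List.index? (1 :: pvChain c 1 t) M = some e := by
      rw [hchain]; exact hidx
    have hflat : (pvRunsOf (c :: t)).flatten = c :: t := by
      simp only [pvRunsOf]; rw [pvRunsB_flatten t c [c]]; rfl
    rw [hA]
    simp only [hmax, hidx']
    have hcast1 : (e : Int) - (M : Int) + 1 = ((e + 1 - M : Nat) : Int) := by omega
    have hcast2 : (e : Int) + 1 = ((e + 1 : Nat) : Int) := by omega
    have htake : e + 1 - (e + 1 - M) = M := by omega
    rw [hcast1, hcast2, PySem.List.slice_natCast, htake, ← hsl, hflat]
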